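-- pv_equiv track=rewrite | github.com/NonRoute/Bioinformatic-I-Project | code/MPS.py | read_mapping
-- ===== SOURCE A (Python) =====
-- def get_score(read, ref_part):
--     score = 0
--     for i in range(len(ref_part)):
--         if read[i] == ref_part[i]:
--             score += 1
--     return score
--
-- def read_mapping(read, ref):
--     max_score, best_idx = (-1, -1)
--     for i in range(len(ref) - len(read) + 1):
--         score = get_score(read, ref[i:i+len(read)])
--         if score > max_score:
--             max_score = score
--             best_idx = i
--     return (max_score, best_idx)
-- ===== SOURCE B (Python) =====
-- def read_mapping(read, ref):
--     n_off = len(ref) - len(read) + 1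
--     scores = [0] * max(n_off, 0)
--     for j, c in enumerate(read):
--         scores = [s + (ref[o + j] == c) for o, s in enumerate(scores)]
--     max_score, best_idx = -1, -1
--     for o, s in enumerate(scores):
--         if s > max_score:
--             max_score, best_idx = s, o
--     return (max_score, best_idx)
-- ===== Notes on version B (the rewrite author's own statement) =====
-- stated objective: alternative
-- what changed: B transposes the traversal: instead of slicing ref per offset and scoring each slice with an inner loop, it keeps one accumulation array of per-offset scores updated column-wise (one pass per read character over all offsets, no slicing), then takes the first argmax in a separate scan.
import Mathlib
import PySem

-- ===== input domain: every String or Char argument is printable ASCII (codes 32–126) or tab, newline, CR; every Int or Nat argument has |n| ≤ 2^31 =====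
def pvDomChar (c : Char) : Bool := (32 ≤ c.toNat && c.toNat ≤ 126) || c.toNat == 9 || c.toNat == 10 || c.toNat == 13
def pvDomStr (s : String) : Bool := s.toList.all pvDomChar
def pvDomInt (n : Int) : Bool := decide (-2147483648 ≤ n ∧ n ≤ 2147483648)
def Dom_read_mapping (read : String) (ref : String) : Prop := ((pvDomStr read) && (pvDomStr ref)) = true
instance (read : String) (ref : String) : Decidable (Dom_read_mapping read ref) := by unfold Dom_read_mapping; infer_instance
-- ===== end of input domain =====

-- B replaces per-offset slicing+scoring with one column-wise accumulation array plus a separate argmax scan (alternative decomposition, same return value).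
-- Note: the Python functions return the pair (max_score, best_idx); per the task signature it is rendered as the two-element list [max_score, best_idx].

-- ===== PORT A =====
def getScore (read : List Char) (refPart : List Char) : Int :=
  (PySem.List.pyRange 0 (refPart.length : Int) 1).foldl
    (fun score i =>
      if PySem.List.pyGet? read i = PySem.List.pyGet? refPart i then score + 1 else score)
    0

def read_mapping (read : String) (ref : String) : List Int :=
  let r := read.toList
  let f := ref.toList
  let res :=
    (PySem.List.pyRange 0 ((f.length : Int) - (r.length : Int) + 1) 1).foldl
      (fun (st : Int × Int) i =>
        let score := getScore r (PySem.List.slice f (some i) (some (i + (r.length : Int))))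
        if score > st.1 then (score, i) else st)
      (-1, -1)
  [res.1, res.2]

-- ===== PORT B =====
def read_mapping_alt (read : String) (ref : String) : List Int :=
  let r := read.toList
  let f := ref.toList
  let nOff : Int := (f.length : Int) - (r.length : Int) + 1
  let init : List Int := List.replicate (max nOff 0).toNat 0
  let scores :=
    (PySem.List.enumerate r 0).foldl
      (fun scores jc =>
        (PySem.List.enumerate scores 0).map
          (fun os => os.2 + if PySem.List.pyGet? f (os.1 + jc.1) = some jc.2 then 1 else 0))
      init
  let res :=
    (PySem.List.enumerate scores 0).foldl
      (fun (st : Int × Int) os => if os.2 > st.1 then (os.2, os.1) else st)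
      (-1, -1)
  [res.1, res.2]

-- ===== PRECONDITION & SPEC =====
def Spec_read_mapping (read : String) (ref : String) (out : List Int) : Prop := out = read_mapping_alt read ref
instance (read : String) (ref : String) (out : List Int) : Decidable (Spec_read_mapping read ref out) := by unfold Spec_read_mapping; infer_instance

-- ===== CLAIM (what is proved, stated in full; the proofs are below) =====
def Claim_equal_read_mapping : Prop := ∀ (read : String) (ref : String), Dom_read_mapping read ref → Spec_read_mapping read ref (read_mapping read ref)

-- ===== LEMMAS AND PROOFS =====

-- the per-offset match score of read's tail (enumerated from index s) against ref (= f) at offset o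
def pScore (f : List Char) (rs : List Char) (s : Int) (o : Int) : Int :=
  ((PySem.List.enumerate rs s).map
    (fun jc => if PySem.List.pyGet? f (o + jc.1) = some jc.2 then (1:Int) else 0)).sum

-- invariant of B's column-wise accumulation loop: entry k grows by exactly pScore
theorem bFold_getElem? (f : List Char) (rs : List Char) (s : Int) (scores0 : List Int) (k : Nat) :
    ((PySem.List.enumerate rs s).foldl
      (fun scores jc =>
        (PySem.List.enumerate scores 0).map
          (fun os => os.2 + if PySem.List.pyGet? f (os.1 + jc.1) = some jc.2 then 1 else 0))
      scores0)[k]? = scores0[k]?.map (fun v => v + pScore f rs s (k : Int)) := by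
  induction rs generalizing s scores0 with
  | nil =>
    cases h : scores0[k]? <;> simp [pScore, PySem.List.enumerate_nil, h]
  | cons x rest ih =>
    rw [PySem.List.enumerate_cons, List.foldl_cons, ih]
    rw [List.getElem?_map, PySem.List.getElem?_enumerate]
    cases h : scores0[k]? with
    | none => simp
    | some v =>
      simp only [Option.map_some, pScore, PySem.List.enumerate_cons,
        List.map_cons, List.sum_cons]
      congr 1
      simp only [zero_add]
      ring

-- B's accumulation loop keeps the array length
theorem bFold_length (f : List Char) (rs : List Char) (s : Int) (scores0 : List Int) :
    ((PySem.List.enumerate rs s).foldl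
      (fun scores jc =>
        (PySem.List.enumerate scores 0).map
          (fun os => os.2 + if PySem.List.pyGet? f (os.1 + jc.1) = some jc.2 then 1 else 0))
      scores0).length = scores0.length := by
  induction rs generalizing s scores0 with
  | nil => simp [PySem.List.enumerate_nil]
  | cons x rest ih =>
    rw [PySem.List.enumerate_cons, List.foldl_cons, ih]
    simp [PySem.List.length_enumerate]

-- A's per-offset slice score equals the canonical per-offset score
theorem aScore_eq_pScore (f : List Char) (r : List Char) (i : Int)
    (hi : 0 ≤ i) (hin : i + (r.length : Int) ≤ (f.length : Int)) :
    getScore r (PySem.List.slice f (some i) (some (i + (r.length : Int)))) = pScore f r 0 i := by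
  have hpart : PySem.List.slice f (some i) (some (i + (r.length : Int)))
      = (f.drop i.toNat).take r.length := by
    rw [PySem.List.slice_toNat f hi (by omega)]
    congr 1
    omega
  have hlen : ((f.drop i.toNat).take r.length).length = r.length := by
    simp; omega
  rw [getScore, hpart, hlen]
  rw [PySem.List.foldl_ite_add_one]
  rw [pScore, PySem.List.enumerate_eq_map_pyRange (d := 'a'), List.map_map]
  have hfun : ((fun (jc : Int × Char) => if PySem.List.pyGet? f (i + jc.1) = some jc.2 then (1:Int) else 0)
        ∘ fun j => (j, PySem.List.pyGetD r j 'a'))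
      = fun j => if (fun j => decide (PySem.List.pyGet? f (i + j) = some (PySem.List.pyGetD r j 'a'))) j = true
          then (1:Int) else 0 := by
    funext j; simp
  rw [hfun, PySem.List.sum_map_ite_one_zero]
  simp only [zero_add, PySem.List.len]
  norm_cast
  apply List.countP_congr
  intro j hj
  rw [PySem.List.mem_pyRange_one] at hj
  have hj0 : 0 ≤ j := hj.1
  have hjm : j < (r.length : Int) := hj.2
  have hjn : j.toNat < r.length := by omega
  have h1 : PySem.List.pyGet? r j = some r[j.toNat] :=
    PySem.List.pyGet?_eq_some_getElem r hj0 (by simpa using hjm)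
  have h2 : PySem.List.pyGet? ((f.drop i.toNat).take r.length) j
      = some (f[i.toNat + j.toNat]'(by omega)) := by
    rw [PySem.List.pyGet?_eq_some_getElem _ hj0 (by simpa [hlen] using hjm)]
    congr 1
    rw [List.getElem_take, List.getElem_drop]
  have h3 : PySem.List.pyGet? f (i + j) = some (f[i.toNat + j.toNat]'(by omega)) := by
    have := PySem.List.pyGet?_eq_some_getElem f (i := i + j) (by omega) (by omega)
    rw [this]
    congr 2
    omega
  have h4 : PySem.List.pyGetD r j 'a' = r[j.toNat] :=
    PySem.List.pyGetD_eq_getElem r 'a' hj0 (by simpa using hjm)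
  simp only [h1, h2, h3, h4]
  simp [eq_comm]

theorem main_eq (read ref : String) : read_mapping read ref = read_mapping_alt read ref := by
  rw [read_mapping, read_mapping_alt]
  simp only []
  set r := read.toList with hr
  set f := ref.toList with hf
  set L : Int := (f.length : Int) - (r.length : Int) + 1 with hL
  by_cases hpos : L ≤ 0
  · have hA : PySem.List.pyRange 0 L = [] := PySem.List.pyRange_one_eq_nil hpos
    have hmax : (max L 0).toNat = 0 := by omega
    have hBlen : ((PySem.List.enumerate r 0).foldl
        (fun scores jc => (PySem.List.enumerate scores 0).map
          (fun os => os.2 + if PySem.List.pyGet? f (os.1 + jc.1) = some jc.2 then 1 else 0))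
        (List.replicate (max L 0).toNat (0:Int))).length = 0 := by
      rw [bFold_length]; simp [hmax]
    have hBnil := List.eq_nil_of_length_eq_zero hBlen
    rw [hA, hBnil]
    simp [PySem.List.enumerate_nil]
  · rw [not_le] at hpos
    set scores : List Int := (PySem.List.enumerate r 0).foldl
        (fun scores jc => (PySem.List.enumerate scores 0).map
          (fun os => os.2 + if PySem.List.pyGet? f (os.1 + jc.1) = some jc.2 then 1 else 0))
        (List.replicate (max L 0).toNat (0:Int)) with hscores
    have hmax : (max L 0).toNat = L.toNat := by omega
    have hsl : scores.length = L.toNat := by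
      rw [hscores, bFold_length]; simp [hmax]
    have hsk : ∀ k : Nat, k < L.toNat → scores[k]? = some (pScore f r 0 (k : Int)) := by
      intro k hk
      rw [hscores, bFold_getElem?, List.getElem?_replicate]
      simp [hmax, hk]
    have hcast : ((scores.length : Int)) = L := by rw [hsl]; omega
    have hgd : ∀ j : Int, j ∈ PySem.List.pyRange 0 L → PySem.List.pyGetD scores j 0 = pScore f r 0 j := by
      intro j hj
      rw [PySem.List.mem_pyRange_one] at hj
      rw [PySem.List.pyGetD_of_nonneg scores 0 hj.1]
      rw [List.getD_eq_getElem?_getD, hsk j.toNat (by omega)]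
      simp [Int.toNat_of_nonneg hj.1]
    have key : PySem.List.enumerate scores 0 = (PySem.List.pyRange 0 L).map (fun j => (j, pScore f r 0 j)) := by
      rw [PySem.List.enumerate_eq_map_pyRange (d := (0:Int))]
      simp only [PySem.List.len, hcast]
      exact List.map_congr_left (fun j hj => by rw [hgd j hj])
    rw [key, List.foldl_map]
    have hfold := PySem.List.foldl_congr_mem (PySem.List.pyRange 0 L)
      (fun (st : Int × Int) i =>
        if getScore r (PySem.List.slice f (some i) (some (i + (r.length : Int)))) > st.1 then
          (getScore r (PySem.List.slice f (some i) (some (i + (r.length : Int)))), i)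
        else st)
      (fun (st : Int × Int) j => if pScore f r 0 j > st.1 then (pScore f r 0 j, j) else st)
      (-1, -1)
      (by
        intro st i hi
        rw [PySem.List.mem_pyRange_one] at hi
        dsimp only
        rw [aScore_eq_pScore f r i hi.1 (by omega)])
    rw [hfold]

-- ===== VERDICT (by name: the statement is the Claim_ definition above) =====
theorem read_mapping_spec : Claim_equal_read_mapping := by
  intro read ref _
  exact main_eq read ref
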